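-- pv_equiv track=rewrite | github.com/brunodrd/nsiboisdo | scripts/NSI1C2/feuillage_2_corr.py | feuillage_2
-- ===== SOURCE A (Python) =====
-- def feuillage_2(hf):
--     """
--     Renvoie une chaîne de caractères correspondant au feuillage d'un sapin s'étendant sur hf lignes.
--     """
--     figure = ' '*(hf-1) + '^' + '\n'
--     for i in range(hf-1):
--         figure = figure + ' '*(hf-i-2) + '/'
--         for k in range(2*i+1):
--             if k%2 == 0:
--                 car = "'"
--             else:
--                 car = '"'
--             figure = figure + car
--         figure = figure + "\\\\" + "\n"
--     return figure
-- ===== SOURCE B (Python) =====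
-- def feuillage_2(hf):
--     """
--     Renvoie une chaîne de caractères correspondant au feuillage d'un sapin s'étendant sur hf lignes.
--     """
--     lines = [' ' * (hf - 1) + '^']
--     for i in range(hf - 1):
--         lines.append(' ' * (hf - i - 2) + '/' + "'\"" * i + "'" + "\\\\")
--     return '\n'.join(lines) + '\n'
-- ===== Notes on version B (the rewrite author's own statement) =====
-- stated objective: faster
-- what changed: Replaces the inner parity loop that emits the alternating quote run character by character with the closed-form string repetition "'\"" * i + "'", and builds the figure as a list of lines joined once with '\n'.join instead of repeated quadratic string concatenation.
import Mathlib
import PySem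

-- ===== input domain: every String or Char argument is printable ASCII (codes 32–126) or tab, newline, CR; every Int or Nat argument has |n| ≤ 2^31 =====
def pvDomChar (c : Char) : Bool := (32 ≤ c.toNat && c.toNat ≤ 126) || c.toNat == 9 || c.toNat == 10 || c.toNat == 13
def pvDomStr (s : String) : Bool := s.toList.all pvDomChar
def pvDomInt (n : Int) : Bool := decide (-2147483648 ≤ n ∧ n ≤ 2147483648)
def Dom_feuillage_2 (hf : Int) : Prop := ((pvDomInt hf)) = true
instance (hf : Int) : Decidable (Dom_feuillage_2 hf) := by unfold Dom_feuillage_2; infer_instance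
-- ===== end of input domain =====

-- B replaces A's character-by-character inner parity loop by the closed-form quote
-- pattern "'\"" * i + "'" and joins collected lines; objective: simpler.

-- ===== PORT A =====
def feuillage_2 (hf : Int) : String :=
  let figure := PySem.List.pyRepeat [' '] (hf - 1) ++ ['^'] ++ ['\n']
  let figure := (PySem.List.pyRange 0 (hf - 1)).foldl (fun figure i =>
    let figure := figure ++ PySem.List.pyRepeat [' '] (hf - i - 2) ++ ['/']
    let figure := (PySem.List.pyRange 0 (2 * i + 1)).foldl (fun figure k =>
      let car := if PySem.Int.mod k 2 = 0 then '\'' else '"'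
      figure ++ [car]) figure
    figure ++ ['\\', '\\'] ++ ['\n']) figure
  String.mk figure

-- ===== PORT B =====
def feuillage_2_alt (hf : Int) : String :=
  let lines : List (List Char) :=
    (PySem.List.pyRepeat [' '] (hf - 1) ++ ['^']) ::
    (PySem.List.pyRange 0 (hf - 1)).map (fun i =>
      PySem.List.pyRepeat [' '] (hf - i - 2) ++ ['/'] ++
      PySem.List.pyRepeat ['\'', '"'] i ++ ['\''] ++ ['\\', '\\'])
  String.mk (PySem.Chars.join ['\n'] lines ++ ['\n'])

-- ===== PRECONDITION & SPEC =====
def Spec_feuillage_2 (hf : Int) (out : String) : Prop := out = feuillage_2_alt hf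
instance (hf : Int) (out : String) : Decidable (Spec_feuillage_2 hf out) := by unfold Spec_feuillage_2; infer_instance

-- ===== CLAIM (what is proved, stated in full; the proofs are below) =====
def Claim_equal_feuillage_2 : Prop := ∀ (hf : Int), Dom_feuillage_2 hf → Spec_feuillage_2 hf (feuillage_2 hf)

-- ===== LEMMAS AND PROOFS =====

-- A's inner parity loop over range(2n+1) emits the alternating run "'\""*n + "'".
theorem inner_fold_nat (n : Nat) (fig : List Char) :
    (PySem.List.pyRange 0 (2 * (n : Int) + 1)).foldl (fun figure k =>
        let car := if PySem.Int.mod k 2 = 0 then '\'' else '"'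
        figure ++ [car]) fig
      = fig ++ PySem.List.pyRepeat ['\'', '"'] (n : Int) ++ ['\''] := by
  induction n generalizing fig with
  | zero =>
    rw [show PySem.List.pyRange 0 (2 * ((0 : Nat) : Int) + 1) = [0] from by decide]
    simp [PySem.List.pyRepeat]
  | succ m ih =>
    have h1 : (2 * ((m : Int) + 1) + 1) = (2 * (m : Int) + 1) + 1 + 1 := by ring
    rw [show ((m + 1 : Nat) : Int) = (m : Int) + 1 by push_cast; ring, h1,
      PySem.List.pyRange_one_succ_right (by omega),
      PySem.List.pyRange_one_succ_right (by omega), List.foldl_append, List.foldl_append, ih]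
    have hrep : PySem.List.pyRepeat ['\'', '"'] ((m : Int) + 1)
        = PySem.List.pyRepeat ['\'', '"'] (m : Int) ++ ['\'', '"'] := by
      simp [PySem.List.pyRepeat, show ((m : Int) + 1).toNat = (m : Int).toNat + 1 by omega,
        List.replicate_succ']
    simp [List.foldl, hrep]
    omega

theorem inner_fold_int (i : Int) (hi : 0 ≤ i) (fig : List Char) :
    (PySem.List.pyRange 0 (2 * i + 1)).foldl (fun figure k =>
        let car := if PySem.Int.mod k 2 = 0 then '\'' else '"'
        figure ++ [car]) fig
      = fig ++ PySem.List.pyRepeat ['\'', '"'] i ++ ['\''] := by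
  have : i = ((i.toNat : Nat) : Int) := by omega
  rw [this]; exact inner_fold_nat i.toNat fig

-- A's outer accumulation equals the flattening of B's per-row lines each followed by '\n'.
theorem outer_fold (hf : Int) (l : List Int) (h : ∀ i ∈ l, 0 ≤ i) (init : List Char) :
    l.foldl (fun figure i =>
      let figure := figure ++ PySem.List.pyRepeat [' '] (hf - i - 2) ++ ['/']
      let figure := (PySem.List.pyRange 0 (2 * i + 1)).foldl (fun figure k =>
        let car := if PySem.Int.mod k 2 = 0 then '\'' else '"'
        figure ++ [car]) figure
      figure ++ ['\\', '\\'] ++ ['\n']) init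
    = init ++ (l.map (fun i =>
        PySem.List.pyRepeat [' '] (hf - i - 2) ++ ['/'] ++
        PySem.List.pyRepeat ['\'', '"'] i ++ ['\''] ++ ['\\', '\\'] ++ ['\n'])).flatten := by
  induction l using List.reverseRecOn with
  | nil => simp
  | append_singleton xs x ih =>
    rw [List.foldl_append]
    rw [ih (fun i hi => h i (List.mem_append_left _ hi))]
    simp only [List.foldl]
    rw [inner_fold_int x (h x (by simp)) _]
    simp [List.append_assoc]

-- '\n'.join(a :: xs) + '\n' flattens to a + '\n' + each x + '\n'.
theorem join_newline (a : List Char) (xs : List (List Char)) :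
    PySem.Chars.join ['\n'] (a :: xs) ++ ['\n']
      = a ++ ['\n'] ++ (xs.map (· ++ ['\n'])).flatten := by
  induction xs generalizing a with
  | nil => simp [PySem.Chars.join_singleton]
  | cons b bs ih =>
    rw [PySem.Chars.join_cons_cons, List.append_assoc, List.append_assoc, ih]
    simp [List.append_assoc]

-- ===== VERDICT (by name: the statement is the Claim_ definition above) =====
theorem feuillage_2_spec : Claim_equal_feuillage_2 := by
  intro hf _
  unfold Spec_feuillage_2
  simp only [feuillage_2, feuillage_2_alt]
  rw [outer_fold hf _ (fun i hi => (PySem.List.mem_pyRange_one.mp hi).1), join_newline]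
  simp [List.map_map, List.append_assoc, Function.comp_def]
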